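-- pv_equiv track=rewrite | github.com/gh0stintheshe11/LeetCode-Solutions | solutions/maximum-spending-after-buying-items/Python3.py | maxSpending
-- ===== SOURCE A (Python) =====
-- from typing import List
--
-- def maxSpending(v: List[List[int]]) -> int:
--     res = []
--     for i in range(len(v)):
--         for j in range(len(v[0])):
--             res.append(v[i][j])
--     ans = 0
--     res.sort()
--     l = 1
--     for i in res:
--         ans += l * i
--         l += 1
--     return ans
-- ===== SOURCE B (Python) =====
-- def maxSpending(v):
--     def merge(a, b):
--         out = []
--         i = j = 0
--         while i < len(a) and j < len(b):
--             if a[i] <= b[j]: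
--                 out.append(a[i]); i += 1
--             else:
--                 out.append(b[j]); j += 1
--         out.extend(a[i:])
--         out.extend(b[j:])
--         return out
--
--     runs = [sorted(row) for row in v]
--     while len(runs) > 1:
--         nxt = []
--         i = 0
--         while i + 1 < len(runs):
--             nxt.append(merge(runs[i], runs[i + 1]))
--             i += 2
--         if i < len(runs):
--             nxt.append(runs[i])
--         runs = nxt
--     merged = runs[0] if runs else []
--     ans = 0
--     for rank, x in enumerate(merged, 1):
--         ans += rank * x
--     return ans
-- ===== Notes on version B (the rewrite author's own statement) =====
-- stated objective: alternative
-- what changed: B never sorts the flattened grid: it sorts each row individually and combines the sorted runs by repeated pairwise two-way merging (bottom-up merge sort over runs), then reads the rank off enumerate instead of maintaining a counter.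
-- outside the precondition, e.g. on maxSpending([[1], [2, 3]]): A returns 5, B returns 14
import Mathlib
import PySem

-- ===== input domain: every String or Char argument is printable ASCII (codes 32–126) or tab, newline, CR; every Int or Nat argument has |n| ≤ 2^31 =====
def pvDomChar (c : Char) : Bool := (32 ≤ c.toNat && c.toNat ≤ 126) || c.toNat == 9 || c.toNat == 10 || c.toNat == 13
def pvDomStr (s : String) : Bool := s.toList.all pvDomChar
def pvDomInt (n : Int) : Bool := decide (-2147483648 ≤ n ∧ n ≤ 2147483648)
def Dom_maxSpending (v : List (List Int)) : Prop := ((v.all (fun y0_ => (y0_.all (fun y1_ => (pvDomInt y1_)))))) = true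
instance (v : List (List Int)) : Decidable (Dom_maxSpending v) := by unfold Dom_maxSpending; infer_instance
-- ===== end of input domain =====

-- B never sorts the flattened grid: it sorts each row and combines the sorted runs by repeated
-- pairwise two-way merging, then reads each element's rank off enumerate ("alternative").

-- ===== PORT A =====
def maxSpending (v : List (List Int)) : Int :=
  let res : List Int :=
    (PySem.List.pyRange 0 (v.length : Int) 1).foldl
      (fun res i =>
        (PySem.List.pyRange 0 (((PySem.List.pyGetD v 0 ([] : List Int)).length : Int)) 1).foldl
          (fun res j => res ++ [PySem.List.pyGetD (PySem.List.pyGetD v i ([] : List Int)) j 0]) res)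
      []
  let res := PySem.List.sorted res (fun x => x) false
  ((res.foldl (fun (p : Int × Int) i => (p.1 + p.2 * i, p.2 + 1)) (0, 1))).1

-- ===== PORT B =====
-- Source B's index-based merge of two sorted lists, transcribed as the obvious recursion on the
-- two lists (same comparisons, same output order, same tail appends).
def pvMerge : List Int → List Int → List Int
  | [], b => b
  | a, [] => a
  | x :: a, y :: b => if x ≤ y then x :: pvMerge a (y :: b) else y :: pvMerge (x :: a) b

-- one pass of Source B's inner while loop: merge adjacent runs pairwise, keep a trailing odd run.
def pvMergePairs : List (List Int) → List (List Int)
  | [] => []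
  | [a] => [a]
  | a :: b :: rest => pvMerge a b :: pvMergePairs rest

lemma pvMergePairs_length (l : List (List Int)) : (pvMergePairs l).length ≤ l.length := by
  induction l using pvMergePairs.induct with
  | case1 => simp [pvMergePairs]
  | case2 a => simp [pvMergePairs]
  | case3 a b rest ih => simp only [pvMergePairs, List.length_cons]; omega

-- Source B's outer while loop: keep merging pairwise until one run remains ([] for an empty grid).
def pvMergeAll : List (List Int) → List Int
  | [] => []
  | [a] => a
  | a :: b :: rest => pvMergeAll (pvMergePairs (a :: b :: rest))
termination_by runs => runs.length
decreasing_by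
  have := pvMergePairs_length rest
  simp only [pvMergePairs, List.length_cons]
  omega

def maxSpending_alt (v : List (List Int)) : Int :=
  let merged := pvMergeAll (v.map (fun row => PySem.List.sorted row (fun x => x) false))
  (PySem.List.enumerate merged 1).foldl (fun ans p => ans + p.1 * p.2) 0

-- ===== PRECONDITION & SPEC =====
-- Pre_ excludes ragged grids: where a row is shorter than row 0 A raises IndexError, and where a
-- row is longer A silently ignores its tail (an artefact of looping j over range(len(v[0]))) —
-- the function's natural domain is rectangular grids.
def Pre_maxSpending (v : List (List Int)) : Prop :=
  ∀ row ∈ v, row.length = (PySem.List.pyGetD v 0 ([] : List Int)).length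
instance (v : List (List Int)) : Decidable (Pre_maxSpending v) := by unfold Pre_maxSpending; infer_instance
def pvWitness_maxSpending : List (List Int) := [[1, 2], [3, 4]]

def Spec_maxSpending (v : List (List Int)) (out : Int) : Prop := out = maxSpending_alt v
instance (v : List (List Int)) (out : Int) : Decidable (Spec_maxSpending v out) := by unfold Spec_maxSpending; infer_instance

-- ===== CLAIM (what is proved, stated in full; the proofs are below) =====
def Claim_equal_maxSpending : Prop := ∀ (v : List (List Int)), Dom_maxSpending v → Pre_maxSpending v → Spec_maxSpending v (maxSpending v)

-- ===== LEMMAS AND PROOFS =====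

lemma merge_perm (a b : List Int) : (pvMerge a b).Perm (a ++ b) := by
  induction a, b using pvMerge.induct with
  | case1 b => simp [pvMerge]
  | case2 a h => simp [pvMerge]
  | case3 x a y b hxy ih => simp only [pvMerge, if_pos hxy]; exact ih.cons x
  | case4 x a y b hxy ih =>
      simp only [pvMerge, if_neg hxy]
      exact (ih.cons y).trans List.perm_middle.symm

lemma merge_sorted (a b : List Int) (ha : a.Pairwise (· ≤ ·)) (hb : b.Pairwise (· ≤ ·)) :
    (pvMerge a b).Pairwise (· ≤ ·) := by
  induction a, b using pvMerge.induct with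
  | case1 b => simpa [pvMerge] using hb
  | case2 a h => simpa [pvMerge] using ha
  | case3 x a y b hxy ih =>
      rw [List.pairwise_cons] at ha
      simp only [pvMerge, if_pos hxy, List.pairwise_cons]
      refine ⟨?_, ih ha.2 hb⟩
      intro z hz
      rcases List.mem_append.1 (((merge_perm a (y :: b)).mem_iff).1 hz) with h | h
      · exact ha.1 z h
      · rcases List.mem_cons.1 h with rfl | h
        · exact hxy
        · exact le_trans hxy ((List.pairwise_cons.1 hb).1 z h)
  | case4 x a y b hxy ih =>
      rw [List.pairwise_cons] at hb
      simp only [pvMerge, if_neg hxy, List.pairwise_cons]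
      refine ⟨?_, ih ha hb.2⟩
      intro z hz
      rcases List.mem_append.1 (((merge_perm (x :: a) b).mem_iff).1 hz) with h | h
      · rcases List.mem_cons.1 h with rfl | h
        · omega
        · exact le_trans (by omega) ((List.pairwise_cons.1 ha).1 z h)
      · exact hb.1 z h

lemma mergePairs_flatten_perm (l : List (List Int)) :
    (pvMergePairs l).flatten.Perm l.flatten := by
  induction l using pvMergePairs.induct with
  | case1 => simp [pvMergePairs]
  | case2 a => simp [pvMergePairs]
  | case3 a b rest ih =>
      simp only [pvMergePairs, List.flatten_cons]
      refine (ih.append_left (pvMerge a b)).trans ?_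
      refine ((merge_perm a b).append_right rest.flatten).trans (List.Perm.of_eq ?_)
      simp

lemma mergePairs_sorted (l : List (List Int)) (h : ∀ r ∈ l, r.Pairwise (· ≤ ·)) :
    ∀ r ∈ pvMergePairs l, r.Pairwise (· ≤ ·) := by
  induction l using pvMergePairs.induct with
  | case1 => simp [pvMergePairs]
  | case2 a => simpa [pvMergePairs] using h
  | case3 a b rest ih =>
      intro r hr
      simp only [pvMergePairs, List.mem_cons] at hr
      rcases hr with rfl | hr
      · exact merge_sorted a b (h a (by simp)) (h b (by simp))
      · exact ih (fun r hr => h r (by simp [hr])) r hr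

lemma map_sorted_flatten_perm (v : List (List Int)) :
    (v.map (fun row => PySem.List.sorted row (fun x => x) false)).flatten.Perm (v.flatMap id) := by
  induction v with
  | nil => simp
  | cons row v ih =>
      simp only [List.map_cons, List.flatten_cons, List.flatMap_cons, id]
      exact ((PySem.List.sorted_perm row (fun x => x) false).append_right _).trans (ih.append_left row)

/-- repeated pairwise merging: the result is sorted and a permutation of everything. -/
lemma mergeAll_spec (l : List (List Int)) (h : ∀ r ∈ l, r.Pairwise (· ≤ ·)) :
    (pvMergeAll l).Pairwise (· ≤ ·) ∧ (pvMergeAll l).Perm l.flatten := by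
  induction l using pvMergeAll.induct with
  | case1 => simp [pvMergeAll]
  | case2 a => simpa [pvMergeAll] using h a (by simp)
  | case3 a b rest ih =>
      obtain ⟨h1, h2⟩ := ih (mergePairs_sorted _ h)
      exact ⟨by simpa [pvMergeAll] using h1,
        by simpa [pvMergeAll] using h2.trans (mergePairs_flatten_perm _)⟩

/-- rank-weighted sum starting from weight `l`. -/
def wsum : Int → List Int → Int
  | _, [] => 0
  | l, x :: s => l * x + wsum (l + 1) s

lemma afold_closed (s : List Int) : ∀ a l : Int,
    s.foldl (fun (p : Int × Int) i => (p.1 + p.2 * i, p.2 + 1)) (a, l)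
      = (a + wsum l s, l + s.length) := by
  induction s with
  | nil => intro a l; simp [wsum]
  | cons x s ih =>
      intro a l
      simp only [List.foldl_cons, ih, wsum, List.length_cons, Prod.mk.injEq]
      refine ⟨by ring, by push_cast; ring⟩

lemma bfold_closed (s : List Int) : ∀ a l : Int,
    (PySem.List.enumerate s l).foldl (fun ans (p : Int × Int) => ans + p.1 * p.2) a
      = a + wsum l s := by
  induction s with
  | nil => intro a l; simp [PySem.List.enumerate_nil, wsum]
  | cons x s ih =>
      intro a l
      rw [PySem.List.enumerate_cons, List.foldl_cons, ih, wsum]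
      ring

-- ===== VERDICT (by name: the statement is the Claim_ definition above) =====
theorem maxSpending_spec : Claim_equal_maxSpending := by
  intro v _ hpre
  unfold Spec_maxSpending maxSpending maxSpending_alt
  have hflat :
      (PySem.List.pyRange 0 (v.length : Int) 1).foldl
        (fun res i =>
          (PySem.List.pyRange 0 (((PySem.List.pyGetD v 0 ([] : List Int)).length : Int)) 1).foldl
            (fun res j => res ++ [PySem.List.pyGetD (PySem.List.pyGetD v i ([] : List Int)) j 0]) res)
        [] = v.flatMap id := by
    rw [PySem.List.foldl_pyRange_zero_pyGetD' v ([] : List Int)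
      (fun res row =>
        (PySem.List.pyRange 0 (((PySem.List.pyGetD v 0 ([] : List Int)).length : Int)) 1).foldl
          (fun res j => res ++ [PySem.List.pyGetD row j 0]) res) []]
    have hc : ∀ (acc : List Int) (row : List Int), row ∈ v →
        (PySem.List.pyRange 0 (((PySem.List.pyGetD v 0 ([] : List Int)).length : Int)) 1).foldl
          (fun res j => res ++ [PySem.List.pyGetD row j 0]) acc = acc ++ row := by
      intro acc row hrow
      rw [← hpre row hrow]
      rw [PySem.List.foldl_pyRange_zero_pyGetD' row (0 : Int)
        (fun res x => res ++ [x]) acc]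
      exact PySem.List.foldl_append_singleton row acc
    rw [PySem.List.foldl_congr_mem v _ (fun res row => res ++ row) [] hc]
    rw [PySem.List.foldl_append_eq_flatten]
    simp
  simp only [hflat]
  obtain ⟨hs, hp⟩ := mergeAll_spec (v.map (fun row => PySem.List.sorted row (fun x => x) false))
    (by intro r hr
        simp only [List.mem_map] at hr
        obtain ⟨row, _, rfl⟩ := hr
        exact PySem.List.sorted_pairwise row (fun x => x))
  have hflat2 := map_sorted_flatten_perm v
  have hsorted :
      PySem.List.sorted (v.flatMap id) (fun x => x) false
        = pvMergeAll (v.map (fun row => PySem.List.sorted row (fun x => x) false)) :=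
    PySem.List.sorted_id_eq_of_perm_of_pairwise _ _ (hp.trans hflat2) hs
  rw [hsorted, afold_closed, bfold_closed]
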